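-- pv_equiv track=rewrite | github.com/pradeep1018/CS522-Assignments | einstein.py | create_einstein_graph
-- ===== SOURCE A (Python) =====
-- def get_neighbours(node):
--     """
--     returns the neighbours of a particular node in which the neighbours have one 1 more than the node
--     we are considering only the neighbours that have one 1 more than the node and
--     not the neighbours that have one 1 less than the node to avoid repetition
--     """
--
--     neighbours = []
--
--     for i in range(len(node)):
--         """ if there is 0 at a particular index, then the node containing 1 at that index should be its neighbour """
--         if node[i] == 0:
--             node[i] = 1
--             neighbours.append(node.copy())
--             node[i] = 0
--
--     return neighbours
--
-- def change_node(node):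
--     """
--     changes the node by considering the list in binary form
--     here the list is taken as reverse of a binary number
--     for instance node = [1, 0, 0] represents 1 not 4
--     this is done to simplify the operations
--     """
--
--     i = 0
--     while node[i] == 1:
--         node[i] = 0
--         i += 1
--     node[i] = 1
--     return node
--
-- def create_einstein_graph(n):
--     """This should create what we are going to call - an Einstein Graph.
--     Which will have 2**n nodes.
--     Vertices should be of the form [0,0,0]...[1,1,1] if n=3. Two
--     vertices are adjacent if they differ in exactly one position. For
--     example, [1,0,1] and [1,0,0] are adjacent, but [1,0,1] and [0,1,1] are
--     not adjacent. Note that if the input is n, you will have 2^n nodes and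
--     each node will have degree n.
--
--     This function should return the graph in the form of a list of tuples:
--     [(a,b),(c,d),...] where a and b are adjacent. Note that we are not
--     supposed to use networkx or any other api for graph theoretic analysis.
--     """
--
--     graph = []
--
--     """
--     the variable node stores the vertex in the form of list of length n
--     node initalized as [0, 0, ... , 0]
--     """
--     node = n*[0]
--
--     """ loop runs until node becomes [1, 1, ... , 1] """
--     while sum(node) < n:
--         """ neighbours has all the vertices which has one 1 more than node """
--         neighbours = get_neighbours(node)
--
--         """ the node and its corresponding neighbours are appended as a tuple to the graph """
--         for neighbour in neighbours:
--             graph.append((node.copy(),neighbour.copy()))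
--
--         """ node is changed by taking the next number of current node when represented in binary form """
--         node = change_node(node)
--     return graph
-- ===== SOURCE B (Python) =====
-- def create_einstein_graph(n):
--     """Direct enumeration: vertices are the integers 0..2**n-1 (little-endian
--     bit lists); an edge goes from v to v with one clear bit set."""
--     if n <= 0:
--         return []
--     graph = []
--     for v in range(1 << n):
--         for i in range(n):
--             if not (v >> i) & 1:
--                 graph.append(([(v >> j) & 1 for j in range(n)],
--                               [((v + (1 << i)) >> j) & 1 for j in range(n)]))
--     return graph
-- ===== Notes on version B (the rewrite author's own statement) =====
-- stated objective: simpler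
-- what changed: Replaces the mutable binary-counter loop with its get_neighbours/change_node helpers by a direct enumeration of vertex integers 0..2^n-1, extracting each bit list and each neighbour (one clear bit set via v + (1<<i)) in closed form.
import Mathlib
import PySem

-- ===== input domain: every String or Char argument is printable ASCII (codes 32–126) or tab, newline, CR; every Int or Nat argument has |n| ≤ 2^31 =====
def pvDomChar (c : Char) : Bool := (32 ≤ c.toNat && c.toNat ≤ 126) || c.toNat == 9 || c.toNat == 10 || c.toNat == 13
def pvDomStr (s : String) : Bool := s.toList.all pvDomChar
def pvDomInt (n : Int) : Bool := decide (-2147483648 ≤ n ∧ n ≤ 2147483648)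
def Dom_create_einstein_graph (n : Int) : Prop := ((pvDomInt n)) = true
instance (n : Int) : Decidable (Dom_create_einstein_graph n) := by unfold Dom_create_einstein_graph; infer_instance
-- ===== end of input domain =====

-- B replaces A's mutable binary-counter loop (change_node/get_neighbours) by a direct
-- closed-form enumeration of vertex integers 0..2^n-1; objective: simpler.


-- ===== PORT A =====
-- get_neighbours: indices i of range(len(node)) are always in range, so List.range /
-- getD/set are exact; the temporary mutation node[i]=1 … node[i]=0 nets to node.set i 1.
def pyGetNeighbours (node : List Int) : List (List Int) :=
  (List.range node.length).foldl
    (fun acc i => if node.getD i 0 == 0 then acc ++ [node.set i 1] else acc) []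

-- change_node: the while loop walks the list front-to-back; A only calls it on nodes
-- that contain a 0, so the [] case (Python IndexError) is unreachable from A's call site.
def pyChangeNode : List Int → List Int
  | [] => []
  | x :: xs => if x == 1 then 0 :: pyChangeNode xs else 1 :: xs

-- the while loop of create_einstein_graph, with fuel 2^n (enough: it runs 2^n - 1 times)
def pyLoop : Nat → Int → List Int → List (List (List Int)) → List (List (List Int))
  | 0, _, _, graph => graph
  | fuel+1, n, node, graph =>
    if node.sum < n then
      pyLoop fuel n (pyChangeNode node)
        (graph ++ (pyGetNeighbours node).map (fun nb => [node, nb]))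
    else graph

def create_einstein_graph (n : Int) : List (List (List Int)) :=
  pyLoop (2 ^ n.toNat) n (List.replicate n.toNat 0) []

-- ===== PORT B =====
-- [(v >> j) & 1 for j in range(n)]
def altBits (n v : Nat) : List Int :=
  (List.range n).map (fun j => (((v >>> j) &&& 1 : Nat) : Int))

def create_einstein_graph_alt (n : Int) : List (List (List Int)) :=
  if n ≤ 0 then []
  else
    (List.range (1 <<< n.toNat)).foldl
      (fun graph v =>
        graph ++ (List.range n.toNat).foldl
          (fun acc i =>
            if ((v >>> i) &&& 1 : Nat) == 0 then
              acc ++ [[altBits n.toNat v, altBits n.toNat (v + (1 <<< i))]]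
            else acc) []) []

-- ===== PRECONDITION & SPEC =====
def Spec_create_einstein_graph (n : Int) (out : List (List (List Int))) : Prop := out = create_einstein_graph_alt n
instance (n : Int) (out : List (List (List Int))) : Decidable (Spec_create_einstein_graph n out) := by unfold Spec_create_einstein_graph; infer_instance

-- ===== CLAIM (what is proved, stated in full; the proofs are below) =====
def Claim_equal_create_einstein_graph : Prop := ∀ (n : Int), Dom_create_einstein_graph n → Spec_create_einstein_graph n (create_einstein_graph n)

-- ===== LEMMAS AND PROOFS =====

-- bit j of v
def pvBit (v j : Nat) : Nat := v / 2 ^ j % 2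

def pvBits (N v : Nat) : List Int := (List.range N).map (fun j => (pvBit v j : Int))

-- the per-vertex edge list both programs produce for vertex v
def pvEdges (N v : Nat) : List (List (List Int)) :=
  (List.range N).foldl
    (fun acc i => if pvBit v i = 0 then acc ++ [[pvBits N v, pvBits N (v + 2 ^ i)]] else acc) []

theorem pvBit_zero (v : Nat) : pvBit v 0 = v % 2 := by simp [pvBit]

theorem pvBit_succ (v j : Nat) : pvBit v (j+1) = pvBit (v / 2) j := by
  simp [pvBit, pow_succ, Nat.div_div_eq_div_mul]
  ring_nf

theorem altBits_eq (N v : Nat) : altBits N v = pvBits N v := by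
  unfold altBits pvBits
  refine List.map_congr_left (fun j hj => ?_)
  simp [pvBit, Nat.shiftRight_eq_div_pow, Nat.and_one_is_mod]

theorem pvBits_succ (N v : Nat) :
    pvBits (N+1) v = ((v % 2 : Nat) : Int) :: pvBits N (v / 2) := by
  unfold pvBits
  rw [List.range_succ_eq_map]
  simp [pvBit_zero, pvBit_succ, Function.comp]

theorem pvBits_set (N : Nat) : ∀ i v, i < N → pvBit v i = 0 →
    (pvBits N v).set i 1 = pvBits N (v + 2 ^ i) := by
  induction N with
  | zero => intro i v h; omega
  | succ N ih =>
    intro i v hi hb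
    cases i with
    | zero =>
      rw [pvBits_succ, pvBits_succ]
      have h2 : v % 2 = 0 := by simpa [pvBit_zero] using hb
      have : (v + 1) % 2 = 1 := by omega
      have hd : (v + 1) / 2 = v / 2 := by omega
      simp [this, hd, List.set]
    | succ i =>
      rw [pvBits_succ, pvBits_succ]
      have hb' : pvBit (v / 2) i = 0 := by rwa [pvBit_succ] at hb
      have hpow : (2:Nat) ^ (i+1) = 2 * 2 ^ i := by ring
      have hm : (v + 2 ^ (i+1)) % 2 = v % 2 := by omega
      have hd : (v + 2 ^ (i+1)) / 2 = v / 2 + 2 ^ i := by omega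
      simp only [List.set, hm, hd]
      rw [ih i (v / 2) (by omega) hb']

theorem pvBits_getD (N : Nat) : ∀ i v, i < N → (pvBits N v).getD i 0 = (pvBit v i : Int) := by
  intro i v h
  simp [pvBits, List.getD, List.getElem?_map, List.getElem?_range h]

theorem pvChangeNode_bits (N : Nat) : ∀ v, v + 1 < 2 ^ N →
    pyChangeNode (pvBits N v) = pvBits N (v + 1) := by
  induction N with
  | zero => intro v h; simp at h
  | succ N ih =>
    intro v h
    rw [pvBits_succ, pvBits_succ]
    have hpow : (2:Nat) ^ (N+1) = 2 * 2 ^ N := by ring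
    by_cases hpar : v % 2 = 1
    · have hm : (v + 1) % 2 = 0 := by omega
      have hd : (v + 1) / 2 = v / 2 + 1 := by omega
      have hlt : v / 2 + 1 < 2 ^ N := by omega
      simp only [pyChangeNode, hpar, hm, hd]
      rw [ih (v / 2) hlt]
      simp
    · have h0 : v % 2 = 0 := by omega
      have hm : (v + 1) % 2 = 1 := by omega
      have hd : (v + 1) / 2 = v / 2 := by omega
      simp [pyChangeNode, h0, hm, hd]

theorem pvBits_sum_top (N : Nat) : (pvBits N (2 ^ N - 1)).sum = (N : Int) := by
  induction N with
  | zero => simp [pvBits]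
  | succ N ih =>
    have hpow : (2:Nat) ^ (N+1) = 2 * 2 ^ N := by ring
    have h1 : (1:Nat) ≤ 2 ^ N := Nat.one_le_two_pow
    have hm : (2 ^ (N+1) - 1) % 2 = 1 := by omega
    have hd : (2 ^ (N+1) - 1) / 2 = 2 ^ N - 1 := by omega
    rw [pvBits_succ, hm, hd, List.sum_cons, ih]
    push_cast
    ring

theorem pvBits_sum_lt (N : Nat) : ∀ v, v + 1 < 2 ^ N → (pvBits N v).sum < (N : Int) := by
  induction N with
  | zero => intro v h; simp at h
  | succ N ih =>
    intro v h
    rw [pvBits_succ]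
    have hpow : (2:Nat) ^ (N+1) = 2 * 2 ^ N := by ring
    have h2 : v % 2 < 2 := Nat.mod_lt _ (by norm_num)
    simp only [List.sum_cons]
    by_cases hlt : v / 2 + 1 < 2 ^ N
    · have := ih (v / 2) hlt
      push_cast
      omega
    · have hv2 : v / 2 = 2 ^ N - 1 := by omega
      have h0 : v % 2 = 0 := by omega
      rw [h0, hv2, pvBits_sum_top]
      push_cast
      omega

theorem pvBit_top (N : Nat) : ∀ i, i < N → pvBit (2 ^ N - 1) i = 1 := by
  induction N with
  | zero => intro i h; omega
  | succ N ih =>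
    intro i hi
    have hpow : (2:Nat) ^ (N+1) = 2 * 2 ^ N := by ring
    have h1 : (1:Nat) ≤ 2 ^ N := Nat.one_le_two_pow
    cases i with
    | zero => rw [pvBit_zero]; omega
    | succ i =>
      rw [pvBit_succ]
      have hd : (2 ^ (N+1) - 1) / 2 = 2 ^ N - 1 := by omega
      rw [hd]
      exact ih i (by omega)

-- a push-if foldl over a list whose condition is everywhere false returns the accumulator
theorem pvFoldl_false {α β : Type} (l : List α) (c : α → Bool) (x : α → β) :
    ∀ acc : List β, (∀ a ∈ l, c a = false) →
      l.foldl (fun acc a => if c a then acc ++ [x a] else acc) acc = acc := by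
  induction l with
  | nil => intro acc _; simp
  | cons h t ih =>
    intro acc hall
    simp only [List.foldl_cons, hall h (by simp)]
    exact ih acc (fun a ha => hall a (by simp [ha]))

theorem pvEdges_top (N : Nat) : pvEdges N (2 ^ N - 1) = [] := by
  unfold pvEdges
  have : ∀ i ∈ List.range N, decide (pvBit (2 ^ N - 1) i = 0) = false := by
    intro i hi
    simp only [List.mem_range] at hi
    simp [pvBit_top N i hi]
  simpa using pvFoldl_false (List.range N) (fun i => decide (pvBit (2 ^ N - 1) i = 0))
    (fun i => [pvBits N (2 ^ N - 1), pvBits N ((2 ^ N - 1) + 2 ^ i)]) [] this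

-- mapping over a push-if foldl
theorem pvFoldl_push_map {α β γ : Type} (f : β → γ) (c : α → Bool) (x : α → β) (l : List α) :
    ∀ acc : List β,
      (l.foldl (fun acc a => if c a then acc ++ [x a] else acc) acc).map f
        = l.foldl (fun acc a => if c a then acc ++ [f (x a)] else acc) (acc.map f) := by
  induction l with
  | nil => intro acc; simp
  | cons h t ih =>
    intro acc
    simp only [List.foldl_cons]
    by_cases hc : c h
    · simp [hc, ih]
    · simp [hc, ih]

-- A's per-vertex work equals the common edge list
theorem pvNeighbours_eq (N v : Nat) :
    (pyGetNeighbours (pvBits N v)).map (fun nb => [pvBits N v, nb]) = pvEdges N v := by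
  unfold pyGetNeighbours pvEdges
  have hlen : (pvBits N v).length = N := by simp [pvBits]
  rw [hlen, pvFoldl_push_map]
  refine PySem.List.foldl_congr_mem _ _ _ _ (fun acc i hi => ?_)
  simp only [List.mem_range] at hi
  rw [pvBits_getD N i v hi]
  by_cases hb : pvBit v i = 0
  · simp [hb, pvBits_set N i v hi hb]
  · simp [hb]

-- B's per-vertex work equals the common edge list
theorem pvAltInner_eq (N v : Nat) :
    (List.range N).foldl
      (fun acc i => if ((v >>> i) &&& 1 : Nat) == 0 then
          acc ++ [[altBits N v, altBits N (v + (1 <<< i))]] else acc) []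
      = pvEdges N v := by
  unfold pvEdges
  refine PySem.List.foldl_congr_mem _ _ _ _ (fun acc i _ => ?_)
  have h1 : ((v >>> i) &&& 1 : Nat) = pvBit v i := by
    simp [pvBit, Nat.shiftRight_eq_div_pow, Nat.and_one_is_mod]
  have h2 : (1 <<< i : Nat) = 2 ^ i := by simp [Nat.one_shiftLeft]
  rw [h1, h2, altBits_eq, altBits_eq]
  simp

-- appending-foldl = flatMap
theorem pvFoldl_append_flatMap {α β : Type} (f : α → List β) (l : List α) :
    ∀ acc : List β, l.foldl (fun acc a => acc ++ f a) acc = acc ++ l.flatMap f := by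
  induction l with
  | nil => intro acc; simp
  | cons h t ih => intro acc; simp [ih]

-- the main loop, characterised: starting at vertex v it emits the edges of v, v+1, …, 2^N-1
theorem pvLoop_eq (n : Int) (N : Nat) (hn : (N : Int) = n) :
    ∀ (fuel v : Nat) (g : List (List (List Int))), v < 2 ^ N → 2 ^ N - v ≤ fuel →
      pyLoop fuel n (pvBits N v) g = g ++ (List.range' v (2 ^ N - v)).flatMap (pvEdges N) := by
  intro fuel
  induction fuel with
  | zero => intro v g hv hf; omega
  | succ fuel ih =>
    intro v g hv hf
    by_cases hlast : v + 1 < 2 ^ N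
    · have hcond : (pvBits N v).sum < n := hn ▸ pvBits_sum_lt N v hlast
      rw [pyLoop, if_pos hcond, pvChangeNode_bits N v hlast, pvNeighbours_eq N v,
        ih (v+1) (g ++ pvEdges N v) hlast (by omega)]
      have hr : List.range' v (2 ^ N - v) = v :: List.range' (v+1) (2 ^ N - (v+1)) := by
        have : 2 ^ N - v = (2 ^ N - (v+1)) + 1 := by omega
        rw [this, List.range'_succ]
      rw [hr]
      simp
    · have hv' : v = 2 ^ N - 1 := by omega
      have hcond : ¬ (pvBits N v).sum < n := by
        rw [hv', pvBits_sum_top N, hn]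
        omega
      rw [pyLoop, if_neg hcond]
      have : 2 ^ N - v = 1 := by omega
      rw [this]
      simp [List.range', hv', pvEdges_top N]

theorem pvBits_zero (N : Nat) : pvBits N 0 = List.replicate N 0 := by
  simp [pvBits, pvBit, List.map_const']

-- ===== VERDICT (by name: the statement is the Claim_ definition above) =====
theorem create_einstein_graph_spec : Claim_equal_create_einstein_graph := by
  intro n _
  unfold Spec_create_einstein_graph create_einstein_graph create_einstein_graph_alt
  by_cases hn : n ≤ 0
  · have h0 : n.toNat = 0 := Int.toNat_of_nonpos hn
    rw [if_pos hn, h0]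
    simp only [pow_zero, List.replicate]
    show pyLoop (0+1) n [] [] = []
    rw [pyLoop]
    have : ¬ (List.sum ([] : List Int) < n) := by simp; omega
    rw [if_neg this]
  · have hcast : ((n.toNat : Nat) : Int) = n := Int.toNat_of_nonneg (by omega)
    rw [if_neg (by omega)]
    rw [← pvBits_zero, pvLoop_eq n n.toNat hcast (2 ^ n.toNat) 0 []
      (Nat.two_pow_pos n.toNat) (by simp)]
    have hshift : (1 <<< n.toNat : Nat) = 2 ^ n.toNat := by simp [Nat.one_shiftLeft]
    rw [hshift]
    have hinner : ∀ (g : List (List (List Int))) (v : Nat),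
        (fun graph v =>
          graph ++ (List.range n.toNat).foldl
            (fun acc i => if ((v >>> i) &&& 1 : Nat) == 0 then
                acc ++ [[altBits n.toNat v, altBits n.toNat (v + (1 <<< i))]]
              else acc) []) g v = g ++ pvEdges n.toNat v := by
      intro g v
      dsimp only []
      rw [pvAltInner_eq]
    calc ([] : List (List (List Int))) ++ (List.range' 0 (2 ^ n.toNat)).flatMap (pvEdges n.toNat)
        = (List.range (2 ^ n.toNat)).flatMap (pvEdges n.toNat) := by
          rw [List.range_eq_range']; simp
      _ = _ := by
          rw [PySem.List.foldl_congr_mem _ _ _ _ (fun acc v _ => hinner acc v),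
            pvFoldl_append_flatMap]
          simp
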